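-- pv_equiv track=rewrite | github.com/adilsonkrischanski/Analise_numerica | Linguagem Python/Divided_Differences.py | eq
-- ===== SOURCE A (Python) =====
-- def eq(x,coeficiente):
--     n = len(x)
--     equation = []
--     for i in range(n):
--         sign = ''
--         if i != 0:
--             sign = "*"
--         equation += f'{coeficiente[0]:+}{sign}'+'*'.join([f'(x{-xj:+})' for j, xj in enumerate(x) if j < i+1])
--     return equation
-- ===== SOURCE B (Python) =====
-- def eq(x, coeficiente):
--     equation = []
--     prod = ''
--     first = True
--     for xi in x:
--         sign = '' if first else '*'
--         first = False
--         prod += sign + f'(x{-xi:+})'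
--         equation += f'{coeficiente[0]:+}' + sign + prod
--     return equation
-- ===== Notes on version B (the rewrite author's own statement) =====
-- stated objective: faster
-- what changed: B keeps the joined product-of-factors string as a running accumulator extended by one factor per iteration, instead of re-joining the whole prefix of factors at every step of the loop.
import Mathlib
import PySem

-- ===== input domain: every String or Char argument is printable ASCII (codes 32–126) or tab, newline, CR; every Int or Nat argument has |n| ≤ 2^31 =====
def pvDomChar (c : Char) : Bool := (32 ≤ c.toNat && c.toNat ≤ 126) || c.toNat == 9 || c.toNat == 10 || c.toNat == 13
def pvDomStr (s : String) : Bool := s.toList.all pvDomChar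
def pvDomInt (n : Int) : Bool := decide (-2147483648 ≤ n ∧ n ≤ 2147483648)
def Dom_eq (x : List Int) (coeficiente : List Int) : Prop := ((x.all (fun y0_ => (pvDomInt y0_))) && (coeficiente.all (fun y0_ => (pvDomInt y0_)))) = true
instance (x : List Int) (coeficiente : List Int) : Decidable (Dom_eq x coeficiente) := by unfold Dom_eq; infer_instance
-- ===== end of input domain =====

-- B maintains the joined product-of-factors string incrementally instead of re-joining the
-- whole prefix at every step (objective: faster, constant/asymptotic work per factor saved).
-- ===== PORT A =====
-- f'{n:+}' as a char list ('+' forced for nonnegative)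
def pvFmtPlus (n : Int) : List Char :=
  if 0 ≤ n then '+' :: PySem.Int.toChars n else PySem.Int.toChars n

-- f'(x{-xj:+})' as a char list
def pvFactor (xj : Int) : List Char :=
  '(' :: 'x' :: (pvFmtPlus (-xj) ++ [')'])

-- list += string extends with the string's characters, as one-char strings
def pvChars (cs : List Char) : List String := cs.map (fun ch => String.ofList [ch])

def eq (x : List Int) (coeficiente : List Int) : List String :=
  (List.range x.length).foldl
    (fun equation i =>
      let sign : List Char := if i ≠ 0 then ['*'] else []
      equation ++
        pvChars (pvFmtPlus ((PySem.List.pyGet? coeficiente 0).getD 0) ++ sign ++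
          PySem.Chars.join ['*'] ((x.take (i + 1)).map pvFactor)))
    []

-- ===== PORT B =====
def eq_alt (x : List Int) (coeficiente : List Int) : List String :=
  (x.foldl
    (fun (st : List String × List Char × Bool) xi =>
      let sign : List Char := if st.2.2 then [] else ['*']
      let prod := st.2.1 ++ sign ++ pvFactor xi
      (st.1 ++
         pvChars (pvFmtPlus ((PySem.List.pyGet? coeficiente 0).getD 0) ++ sign ++ prod),
       prod, false))
    ([], [], true)).1

-- ===== PRECONDITION & SPEC =====
-- A raises IndexError on coeficiente[0] whenever the loop runs (x nonempty) and coeficiente is empty.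
def Pre_eq (x : List Int) (coeficiente : List Int) : Prop := x = [] ∨ coeficiente ≠ []
instance (x : List Int) (coeficiente : List Int) : Decidable (Pre_eq x coeficiente) := by unfold Pre_eq; infer_instance
def pvWitness_eq : List Int × List Int := ([1, -2], [3])

def Spec_eq (x : List Int) (coeficiente : List Int) (out : List String) : Prop := out = eq_alt x coeficiente
instance (x : List Int) (coeficiente : List Int) (out : List String) : Decidable (Spec_eq x coeficiente out) := by unfold Spec_eq; infer_instance

-- ===== CLAIM (what is proved, stated in full; the proofs are below) =====
def Claim_equal_eq : Prop := ∀ (x : List Int) (coeficiente : List Int), Dom_eq x coeficiente → Pre_eq x coeficiente → Spec_eq x coeficiente (eq x coeficiente)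

-- ===== LEMMAS AND PROOFS =====

-- common recursive description of the output, with the already-seen prefix `pre`
def pvSpecRun (c : Int) (pre ys : List Int) : List String :=
  match ys with
  | [] => []
  | y :: t =>
      pvChars (pvFmtPlus c ++ (if pre.isEmpty then [] else ['*']) ++
        PySem.Chars.join ['*'] ((pre ++ [y]).map pvFactor)) ++
      pvSpecRun c (pre ++ [y]) t

theorem pvJoin_append_singleton (l : List (List Char)) (z : List Char) :
    PySem.Chars.join ['*'] (l ++ [z])
      = PySem.Chars.join ['*'] l ++ (if l.isEmpty then [] else ['*']) ++ z := by
  induction l with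
  | nil => simp [PySem.Chars.join, List.intercalate, List.intersperse]
  | cons a t ih =>
      cases t with
      | nil => simp [PySem.Chars.join, List.intercalate, List.intersperse]
      | cons b u =>
          simp only [List.cons_append, PySem.Chars.join_cons_cons]
          rw [show b :: (u ++ [z]) = (b :: u) ++ [z] from rfl, ih]
          simp

theorem pvA_loop (c : Int) (pre ys : List Int) (acc : List String) :
    (List.range' pre.length ys.length).foldl
      (fun equation i =>
        let sign : List Char := if i ≠ 0 then ['*'] else []
        equation ++
          pvChars (pvFmtPlus c ++ sign ++
            PySem.Chars.join ['*'] (((pre ++ ys).take (i + 1)).map pvFactor)))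
      acc
    = acc ++ pvSpecRun c pre ys := by
  induction ys generalizing pre acc with
  | nil => simp [pvSpecRun]
  | cons y t ih =>
      rw [List.length_cons, List.range'_succ, List.foldl_cons]
      have htake : (pre ++ y :: t).take (pre.length + 1) = pre ++ [y] := by
        rw [show pre.length + 1 = pre.length + 1 from rfl]
        rw [List.take_append]
        simp
      have hx : pre ++ y :: t = (pre ++ [y]) ++ t := by simp
      have hlen : pre.length + 1 = (pre ++ [y]).length := by simp
      simp only [htake]
      rw [hx, hlen, ih]
      have hsign : (if pre.length ≠ 0 then (['*'] : List Char) else [])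
          = (if pre.isEmpty then [] else ['*']) := by
        cases pre <;> simp
      simp [pvSpecRun]

theorem pvB_loop (c : Int) (ys : List Int) (coeficiente : List Int)
    (hc : c = (PySem.List.pyGet? coeficiente 0).getD 0)
    (pre : List Int) (acc : List String) (P : List Char) (b : Bool)
    (hP : P = PySem.Chars.join ['*'] (pre.map pvFactor)) (hb : b = pre.isEmpty) :
    ys.foldl
      (fun (st : List String × List Char × Bool) xi =>
        let sign : List Char := if st.2.2 then [] else ['*']
        let prod := st.2.1 ++ sign ++ pvFactor xi
        (st.1 ++
           pvChars (pvFmtPlus ((PySem.List.pyGet? coeficiente 0).getD 0) ++ sign ++ prod),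
         prod, false))
      (acc, P, b)
    = (acc ++ pvSpecRun c pre ys,
       PySem.Chars.join ['*'] ((pre ++ ys).map pvFactor), (pre ++ ys).isEmpty) := by
  induction ys generalizing pre acc P b with
  | nil => simp [pvSpecRun, hP, hb]
  | cons y t ih =>
      rw [List.foldl_cons]
      have hprod : P ++ (if b then [] else ['*']) ++ pvFactor y
          = PySem.Chars.join ['*'] ((pre ++ [y]).map pvFactor) := by
        rw [hP, hb, List.map_append, List.map_cons, List.map_nil, pvJoin_append_singleton]
        cases pre <;> simp
      show t.foldl _
          (acc ++ pvChars (pvFmtPlus ((PySem.List.pyGet? coeficiente 0).getD 0) ++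
              (if b then [] else ['*']) ++ (P ++ (if b then [] else ['*']) ++ pvFactor y)),
           P ++ (if b then [] else ['*']) ++ pvFactor y, false) = _
      rw [hprod,
        ih (pre ++ [y]) _ _ false rfl (by simp),
        show pre ++ [y] ++ t = pre ++ y :: t by simp]
      have hsign : (if b then ([] : List Char) else ['*'])
          = (if pre.isEmpty then [] else ['*']) := by rw [hb]
      rw [hsign, hc]
      simp [pvSpecRun]

-- ===== VERDICT (by name: the statement is the Claim_ definition above) =====
theorem eq_spec : Claim_equal_eq := by
  intro x coeficiente _ _
  unfold Spec_eq eq eq_alt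
  rw [List.range_eq_range']
  have hA := pvA_loop ((PySem.List.pyGet? coeficiente 0).getD 0) [] x []
  simp only [List.length_nil, List.nil_append] at hA
  rw [hA]
  have hB := pvB_loop ((PySem.List.pyGet? coeficiente 0).getD 0) x coeficiente rfl
      [] [] [] true (by simp [PySem.Chars.join, List.intercalate]) rfl
  simp only [List.nil_append] at hB
  rw [hB]
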